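-- pv_equiv track=rewrite | github.com/gyang274/leetcode | src/1600-1699/1649.sort.through.instructions.py | createSortedArray
-- ===== SOURCE A (Python) =====
-- from typing import List
--
-- def createSortedArray(instructions: List[int]) -> int:
--   # binary index tree, TC: O(NlogM), SC: O(M), where N = len(A), M = max(A)
--   # https://www.hackerearth.com/practice/notes/binary-indexed-tree-or-fenwick-tree/
--   m = max(instructions)
--   v = [0] * (m + 1)
--   def update(x):
--     while x <= m:
--       v[x] += 1
--       x += x & -x
--   def get(x):
--     s = 0
--     while x > 0:
--       s += v[x]
--       x -= x & -x
--     return s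
--   s = 0
--   for i, x in enumerate(instructions):
--     s += min(get(x - 1), i - get(x))
--     update(x)
--   return s % (10 ** 9 + 7)
-- ===== SOURCE B (Python) =====
-- def createSortedArray(instructions):
--     total = 0
--     for i, x in enumerate(instructions):
--         less = 0
--         greater = 0
--         for y in instructions[:i]:
--             if y < x:
--                 less += 1
--             elif y > x:
--                 greater += 1
--         total += min(less, greater)
--     return total % (10 ** 9 + 7)
-- ===== Notes on version B (the rewrite author's own statement) =====
-- stated objective: simpler
-- what changed: Replaces the value-indexed Fenwick (binary indexed) tree with a direct scan of the already-processed prefix that counts smaller and larger elements for each instruction, removing the tree, the O(max) array and all bit manipulation.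
import Mathlib
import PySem

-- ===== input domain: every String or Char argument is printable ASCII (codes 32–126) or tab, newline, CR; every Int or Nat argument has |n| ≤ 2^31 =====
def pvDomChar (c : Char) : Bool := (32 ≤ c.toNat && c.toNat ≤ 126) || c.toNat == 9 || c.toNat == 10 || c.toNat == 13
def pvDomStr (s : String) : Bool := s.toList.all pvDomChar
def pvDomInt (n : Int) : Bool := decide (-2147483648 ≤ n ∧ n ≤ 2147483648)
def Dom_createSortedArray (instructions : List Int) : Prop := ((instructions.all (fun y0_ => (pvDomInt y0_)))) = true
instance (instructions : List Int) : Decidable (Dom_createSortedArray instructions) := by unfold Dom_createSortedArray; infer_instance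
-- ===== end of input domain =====

-- B replaces A's value-indexed Fenwick tree with a direct count over the already-seen prefix
-- (objective: simpler).  Equivalence is claimed for nonempty lists of positive ints (Pre_),
-- exactly where Python A returns (elsewhere A raises or loops forever; B returns 0 on []).

-- ===== PORT A =====

-- x & -x for a positive Python int x equals x - (x & (x-1)); ported on Nat (exact for x ≥ 1,
-- which Pre_ guarantees for every tree index reached).
def pvLowbit (n : Nat) : Nat := n - (n &&& (n - 1))

-- needed by the ports' termination proofs, hence stated above them
theorem pvLowbit_pos {n : Nat} (h : 1 ≤ n) : 1 ≤ pvLowbit n := by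
  have h1 : n &&& (n - 1) ≤ n - 1 := Nat.and_le_right
  unfold pvLowbit; omega

-- while x <= m: v[x] += 1; x += x & -x   (v modelled as a map Nat → Int; Python's list is only
-- read/written at indices 1..m under Pre_, so the representation is exact there; the 1 ≤ x guard
-- is vacuous under Pre_ and only makes the recursion terminating)
def pvUpdate (m : Nat) (x : Nat) (v : Nat → Int) : Nat → Int :=
  if h : 1 ≤ x ∧ x ≤ m then
    pvUpdate m (x + pvLowbit x) (fun y => if y = x then v y + 1 else v y)
  else v
termination_by m + 1 - x
decreasing_by have := pvLowbit_pos h.1; omega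

-- s = 0; while x > 0: s += v[x]; x -= x & -x; return s
def pvGet (v : Nat → Int) (x : Nat) : Int :=
  if h : 1 ≤ x then v x + pvGet v (x - pvLowbit x) else 0
termination_by x
decreasing_by have := pvLowbit_pos h; omega

def pvStepA (m : Nat) (st : (Nat → Int) × Int) (ix : Int × Int) : (Nat → Int) × Int :=
  (pvUpdate m ix.2.toNat st.1,
   st.2 + min (pvGet st.1 (ix.2.toNat - 1)) (ix.1 - pvGet st.1 ix.2.toNat))

def createSortedArray (instructions : List Int) : Int :=
  match PySem.List.max? instructions (fun y => y) with
  | none => 0   -- Python: max([]) raises ValueError; excluded by Pre_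
  | some mI =>
    let m := mI.toNat
    let st := (PySem.List.enumerate instructions 0).foldl (pvStepA m) ((fun _ => 0), 0)
    PySem.Int.mod st.2 (10 ^ 9 + 7)

-- ===== PORT B =====

def pvStepB (L : List Int) (total : Int) (ix : Int × Int) : Int :=
  let pre := PySem.List.slice L none (some ix.1)
  let lg := pre.foldl
    (fun lg y => if y < ix.2 then (lg.1 + 1, lg.2)
                 else if ix.2 < y then (lg.1, lg.2 + 1) else lg) ((0 : Int), (0 : Int))
  total + min lg.1 lg.2

def createSortedArray_alt (instructions : List Int) : Int :=
  let total := (PySem.List.enumerate instructions 0).foldl (pvStepB instructions) 0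
  PySem.Int.mod total (10 ^ 9 + 7)

-- ===== PRECONDITION & SPEC =====
-- Pre_ excludes exactly the inputs on which Python A does not return: the empty list
-- (max() raises ValueError) and lists containing an element ≤ 0 (update() then loops forever
-- at x = 0, or indexes an empty/negative-sized tree raising IndexError).
def Pre_createSortedArray (instructions : List Int) : Prop :=
  instructions ≠ [] ∧ ∀ x ∈ instructions, 1 ≤ x
instance (instructions : List Int) : Decidable (Pre_createSortedArray instructions) := by
  unfold Pre_createSortedArray; infer_instance

def pvWitness_createSortedArray : List Int := [1, 5, 6, 2]

def Spec_createSortedArray (instructions : List Int) (out : Int) : Prop := out = createSortedArray_alt instructions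
instance (instructions : List Int) (out : Int) : Decidable (Spec_createSortedArray instructions out) := by unfold Spec_createSortedArray; infer_instance

-- ===== CLAIM (what is proved, stated in full; the proofs are below) =====
def Claim_equal_createSortedArray : Prop := ∀ (instructions : List Int), Dom_createSortedArray instructions → Pre_createSortedArray instructions → Spec_createSortedArray instructions (createSortedArray instructions)

-- ===== LEMMAS AND PROOFS =====

theorem land_odd_even (a : Nat) : (2 * a + 1) &&& (2 * a) = 2 * a := by
  apply Nat.eq_of_testBit_eq
  intro i
  cases i with
  | zero => simp [Nat.testBit_land, Nat.testBit_zero]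
  | succ k =>
    rw [Nat.testBit_land]
    simp only [Nat.testBit_succ]
    rw [show (2 * a + 1) / 2 = a by omega, show (2 * a) / 2 = a by omega]
    simp

theorem land_even_odd (a : Nat) (h : 1 ≤ a) : (2 * a) &&& (2 * a - 1) = 2 * (a &&& (a - 1)) := by
  apply Nat.eq_of_testBit_eq
  intro i
  cases i with
  | zero => simp [Nat.testBit_land, Nat.testBit_zero]
  | succ k =>
    rw [Nat.testBit_land]
    simp only [Nat.testBit_succ]
    rw [show (2 * a) / 2 = a by omega, show (2 * a - 1) / 2 = a - 1 by omega,
        show (2 * (a &&& (a-1))) / 2 = a &&& (a - 1) by omega, Nat.testBit_land]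

theorem pvLowbit_odd (a : Nat) : pvLowbit (2 * a + 1) = 1 := by
  have h := land_odd_even a
  unfold pvLowbit
  rw [show 2 * a + 1 - 1 = 2 * a from rfl, h]
  omega

theorem pvLowbit_even {a : Nat} (h : 1 ≤ a) : pvLowbit (2 * a) = 2 * pvLowbit a := by
  have key := land_even_odd a h
  have h1 : a &&& (a - 1) ≤ a - 1 := Nat.and_le_right
  unfold pvLowbit
  omega

theorem pvLowbit_le (n : Nat) : pvLowbit n ≤ n := by
  unfold pvLowbit; omega

theorem pvLowbit_add : ∀ {p : Nat}, 1 ≤ p → 2 * pvLowbit p ≤ pvLowbit (p + pvLowbit p) := by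
  intro p
  induction p using Nat.strong_induction_on with
  | _ p ih =>
    intro hp
    rcases Nat.even_or_odd p with ⟨a, ha⟩ | ⟨a, ha⟩
    · have ha' : p = 2 * a := by omega
      subst ha'
      have ha1 : 1 ≤ a := by omega
      rw [pvLowbit_even ha1, show 2 * a + 2 * pvLowbit a = 2 * (a + pvLowbit a) by ring,
          pvLowbit_even (by have := pvLowbit_pos ha1; omega)]
      have := ih a (by omega) ha1
      omega
    · subst ha
      rw [pvLowbit_odd a, show 2 * a + 1 + 1 = 2 * (a + 1) by ring, pvLowbit_even (by omega)]
      have := pvLowbit_pos (show 1 ≤ a + 1 by omega)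
      omega

theorem pvLowbit_between : ∀ {p y : Nat}, p < y → y < p + pvLowbit p → p ≤ y - pvLowbit y := by
  intro p
  induction p using Nat.strong_induction_on with
  | _ p ih =>
    intro y h1 h2
    rcases Nat.eq_zero_or_pos p with hp0 | hp1
    · subst hp0
      simp [pvLowbit] at h2
    rcases Nat.even_or_odd p with ⟨a, ha⟩ | ⟨a, ha⟩
    · have ha' : p = 2 * a := by omega
      subst ha'
      have ha1 : 1 ≤ a := by omega
      rw [pvLowbit_even ha1] at h2
      rcases Nat.even_or_odd y with ⟨b, hb⟩ | ⟨b, hb⟩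
      · have hb' : y = 2 * b := by omega
        subst hb'
        have hab : a < b := by omega
        have hb2 : b < a + pvLowbit a := by omega
        have := ih a (by omega) hab hb2
        have hlb := pvLowbit_le b
        rw [pvLowbit_even (by omega)]
        omega
      · subst hb
        rw [pvLowbit_odd b]
        omega
    · subst ha
      rw [pvLowbit_odd a] at h2
      omega


theorem pvGet_eq (v : Nat → Int) (x : Nat) :
    pvGet v x = if 1 ≤ x then v x + pvGet v (x - pvLowbit x) else 0 := by
  rw [pvGet]; split <;> simp_all

theorem pvUpdate_untouched (m p : Nat) (v : Nat → Int) :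
    ∀ y, (y < p ∨ p - pvLowbit p < y - pvLowbit y) → pvUpdate m p v y = v y := by
  induction p, v using pvUpdate.induct (m := m) with
  | case1 x v h ih =>
    intro y hy
    simp only [dite_eq_ite] at ih
    have hx1 : 1 ≤ x := h.1
    have hlbx := pvLowbit_pos hx1
    have hlble := pvLowbit_le x
    have hadd := pvLowbit_add hx1
    rw [pvUpdate]
    simp only [dif_pos h]
    rw [ih y ?_]
    · have hyx : y ≠ x := by
        rcases hy with hy | hy
        · omega
        · intro he; subst he; omega
      simp [hyx]
    · rcases hy with hy | hy
      · left; omega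
      · right; omega
  | case2 x v h =>
    intro y hy
    rw [pvUpdate]; simp only [dif_neg h]

theorem pvUpdate_touch (m p : Nat) (v : Nat → Int) :
    ∀ y, 1 ≤ y → p ≤ y → y ≤ m → y - pvLowbit y < p → pvUpdate m p v y = v y + 1 := by
  induction p, v using pvUpdate.induct (m := m) with
  | case1 x v h ih =>
    intro y h1 h2 h3 h4
    simp only [dite_eq_ite] at ih
    have hx1 : 1 ≤ x := h.1
    have hlbx := pvLowbit_pos hx1
    rw [pvUpdate]
    simp only [dif_pos h]
    by_cases hxy : y = x
    · subst hxy
      rw [pvUpdate_untouched _ _ _ y (Or.inl (by omega))]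
      simp
    · have hlt : x < y := lt_of_le_of_ne h2 (fun he => hxy he.symm)
      have hnext : x + pvLowbit x ≤ y := by
        by_contra hc
        push_neg at hc
        have := pvLowbit_between hlt hc
        omega
      rw [ih y h1 hnext h3 (by omega)]
      simp [hxy]
  | case2 x v h =>
    intro y h1 h2 h3 h4
    exact absurd ⟨by omega, by omega⟩ h

theorem pvGet_congr (v : Nat → Int) (x : Nat) :
    ∀ w : Nat → Int, (∀ i, 1 ≤ i → i ≤ x → v i = w i) → pvGet v x = pvGet w x := by
  induction x using pvGet.induct with
  | case1 x h ih =>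
    intro w hw
    have hlb := pvLowbit_pos h
    have hle := pvLowbit_le x
    rw [pvGet_eq v, pvGet_eq w, if_pos h, if_pos h, hw x h le_rfl,
        ih w (fun i hi1 hi2 => hw i hi1 (by omega))]
  | case2 x h =>
    intro w _
    rw [pvGet_eq v, pvGet_eq w, if_neg h, if_neg h]

theorem pvGet_zero : ∀ x : Nat, pvGet (fun _ => 0) x = 0 := by
  intro x
  induction x using Nat.strong_induction_on with
  | _ x ih =>
    rw [pvGet]
    split
    · rename_i h
      have := pvLowbit_pos h
      rw [ih (x - pvLowbit x) (by omega)]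
      simp
    · rfl

theorem pvGet_update (m p : Nat) (hp1 : 1 ≤ p) (hpm : p ≤ m) :
    ∀ x, x ≤ m → ∀ v, pvGet (pvUpdate m p v) x = pvGet v x + (if p ≤ x then 1 else 0) := by
  intro x
  induction x using Nat.strong_induction_on with
  | _ x ih =>
    intro hxm v
    have hlbp := pvLowbit_pos hp1
    by_cases hx1 : 1 ≤ x
    · have hlbx := pvLowbit_pos hx1
      have hlbxle := pvLowbit_le x
      by_cases hpx : p ≤ x
      · rw [pvGet_eq (pvUpdate m p v), pvGet_eq v, if_pos hx1, if_pos hx1, if_pos hpx]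
        by_cases hc : p ≤ x - pvLowbit x
        · rw [pvUpdate_untouched _ _ _ x (Or.inr (by omega)),
              ih (x - pvLowbit x) (by omega) (by omega) v, if_pos hc]
          ring
        · push_neg at hc
          rw [pvUpdate_touch _ _ _ x hx1 hpx hxm hc]
          rw [pvGet_congr (pvUpdate m p v) (x - pvLowbit x) v
              (fun i hi1 hi2 => pvUpdate_untouched _ _ _ i (Or.inl (by omega)))]
          ring
      · push_neg at hpx
        rw [if_neg (by omega),
            pvGet_congr (pvUpdate m p v) x v
              (fun i hi1 hi2 => pvUpdate_untouched _ _ _ i (Or.inl (by omega))),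
            add_zero]
    · rw [if_neg (by omega), pvGet_eq (pvUpdate m p v), pvGet_eq v, if_neg hx1, if_neg hx1]
      ring

theorem filter_partition (x : Int) : ∀ l : List Int,
    (l.filter (fun y => decide (y ≤ x))).length + (l.filter (fun y => decide (x < y))).length
      = l.length := by
  intro l
  induction l with
  | nil => simp
  | cons h t ih => simp only [List.filter_cons]; split_ifs <;> simp_all <;> omega

theorem pair_count (x : Int) : ∀ (l : List Int) (a b : Int),
    l.foldl (fun lg y => if y < x then (lg.1 + 1, lg.2)
                         else if x < y then (lg.1, lg.2 + 1) else lg) (a, b)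
    = (a + ((l.filter (fun y => decide (y < x))).length : Int),
       b + ((l.filter (fun y => decide (x < y))).length : Int)) := by
  intro l
  induction l with
  | nil => intro a b; simp
  | cons h t ih =>
    intro a b
    by_cases h1 : h < x
    · simp only [List.foldl_cons, List.filter_cons, h1, if_pos, decide_true]
      rw [ih]
      have : ¬ x < h := by omega
      simp [this]
      push_cast
      ring
    · by_cases h2 : x < h
      · simp only [List.foldl_cons, List.filter_cons, if_neg h1, if_pos h2]
        rw [ih]
        simp [h1, h2]
        push_cast
        ring
      · simp only [List.foldl_cons, List.filter_cons, if_neg h1, if_neg h2]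
        rw [ih]
        simp [h1, h2]

theorem loop_eq (L : List Int) (mI : Int) (m : Nat) (hm : m = mI.toNat) :
    ∀ (suf pre : List Int) (v : Nat → Int) (s : Int),
    L = pre ++ suf →
    (∀ y ∈ suf, 1 ≤ y ∧ y ≤ mI) →
    (∀ t : Nat, t ≤ m → pvGet v t = ((pre.filter (fun y => decide (y ≤ (t : Int)))).length : Int)) →
    ((PySem.List.enumerate suf ((pre.length : Int))).foldl (pvStepA m) (v, s)).2
      = (PySem.List.enumerate suf ((pre.length : Int))).foldl (pvStepB L) s := by
  intro suf
  induction suf with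
  | nil => intro pre v s _ _ _; simp [PySem.List.enumerate]
  | cons x suf ih =>
    intro pre v s hL hsuf hv
    obtain ⟨hx1, hxm⟩ := hsuf x (by simp)
    have hxtm : x.toNat ≤ m := by omega
    have hxt1 : 1 ≤ x.toNat := by omega
    have hxcast : ((x.toNat : Nat) : Int) = x := by omega
    rw [PySem.List.enumerate_cons, List.foldl_cons, List.foldl_cons]
    have hpre : PySem.List.slice L none (some ((pre.length : Nat) : Int)) = pre := by
      rw [PySem.List.slice_to L (Int.natCast_nonneg _), hL]
      simp
    have hB : pvStepB L s ((pre.length : Int), x)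
        = s + min ((pre.filter (fun y => decide (y < x))).length : Int)
                  ((pre.filter (fun y => decide (x < y))).length : Int) := by
      simp only [pvStepB]
      rw [hpre, pair_count]
      simp
    have hless : pvGet v (x.toNat - 1) = ((pre.filter (fun y => decide (y < x))).length : Int) := by
      rw [hv _ (by omega)]
      congr 2
      apply List.filter_congr
      intro y _
      simp only [decide_eq_decide]
      omega
    have hcnt : pvGet v x.toNat = ((pre.filter (fun y => decide (y ≤ x))).length : Int) := by
      rw [hv _ hxtm]
      congr 2
      apply List.filter_congr
      intro y _
      simp only [decide_eq_decide]
      omega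
    have hgreater : (pre.length : Int) - pvGet v x.toNat
        = ((pre.filter (fun y => decide (x < y))).length : Int) := by
      rw [hcnt]
      have := filter_partition x pre
      omega
    have hA : pvStepA m (v, s) ((pre.length : Int), x)
        = (pvUpdate m x.toNat v,
           s + min ((pre.filter (fun y => decide (y < x))).length : Int)
                   ((pre.filter (fun y => decide (x < y))).length : Int)) := by
      unfold pvStepA
      rw [hless, hcnt, ← hgreater, hcnt]
    rw [hA, hB]
    have hlen : ((pre.length : Int)) + 1 = (((pre ++ [x]).length : Nat) : Int) := by
      simp
    rw [hlen]
    apply ih (pre ++ [x])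
    · rw [hL]; simp
    · intro y hy; exact hsuf y (by simp [hy])
    · intro t ht
      rw [pvGet_update m x.toNat hxt1 hxtm t ht v, hv t ht]
      rw [List.filter_append]
      simp only [List.length_append, List.filter_cons, List.filter_nil]
      by_cases hc : x ≤ (t : Int)
      · rw [if_pos (by omega)]
        simp [hc]
      · rw [if_neg (by omega)]
        simp [hc]

-- ===== VERDICT (by name: the statement is the Claim_ definition above) =====
theorem createSortedArray_spec : Claim_equal_createSortedArray := by
  intro L _ hpre
  unfold Spec_createSortedArray createSortedArray createSortedArray_alt
  cases hmax : PySem.List.max? L (fun y => y) with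
  | none =>
    exact absurd ((PySem.List.max?_eq_none_iff L (fun y => y)).mp hmax) hpre.1
  | some mI =>
    have hmax' := PySem.List.max?_isMax hmax
    have h := loop_eq L mI mI.toNat rfl L [] (fun _ => 0) 0 (by simp)
      (fun y hy => ⟨hpre.2 y hy, hmax' y hy⟩)
      (fun t _ => by rw [pvGet_zero]; simp)
    simp only [List.length_nil, Int.natCast_zero] at h
    show PySem.Int.mod ((PySem.List.enumerate L 0).foldl (pvStepA mI.toNat) ((fun _ => 0), 0)).2 (10 ^ 9 + 7)
      = PySem.Int.mod ((PySem.List.enumerate L 0).foldl (pvStepB L) 0) (10 ^ 9 + 7)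
    rw [h]
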